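-- pv_equiv track=rewrite | github.com/anas130/MoroccanLicencePlateRecognition | app.py | arab_character_postion
-- ===== SOURCE A (Python) =====
-- def arab_character_postion(distances):
--   sorted_distances=[]
--   sorted_distances=sorted(distances,reverse=True)
--   max1=sorted_distances[0]
--   max2=sorted_distances[1]
--   for i in range(len(distances)):
--     if distances[i]==max1:
--       return i+1
--     if distances[i]==max2:
--       return i+1
-- ===== SOURCE B (Python) =====
-- def arab_character_postion(distances):
--   # Single streaming pass keeps the two largest values (no sorting); the answer
--   # is the first position whose value reaches the second-largest threshold,
--   # since exactly the elements >= second-largest equal one of the top two.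
--   best = None
--   second = None
--   for v in distances:
--     if best is None or v > best:
--       best, second = v, best
--     elif second is None or v > second:
--       second = v
--   for i in range(len(distances)):
--     if distances[i] >= second:
--       return i + 1
-- ===== Notes on version B (the rewrite author's own statement) =====
-- stated objective: alternative
-- what changed: Replaces sorting entirely: B computes the two largest values in one streaming pass with a (best, second) accumulator, then returns the first position whose value reaches the second-largest threshold (elements >= second-largest are exactly those equal to one of the top two).
import Mathlib
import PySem

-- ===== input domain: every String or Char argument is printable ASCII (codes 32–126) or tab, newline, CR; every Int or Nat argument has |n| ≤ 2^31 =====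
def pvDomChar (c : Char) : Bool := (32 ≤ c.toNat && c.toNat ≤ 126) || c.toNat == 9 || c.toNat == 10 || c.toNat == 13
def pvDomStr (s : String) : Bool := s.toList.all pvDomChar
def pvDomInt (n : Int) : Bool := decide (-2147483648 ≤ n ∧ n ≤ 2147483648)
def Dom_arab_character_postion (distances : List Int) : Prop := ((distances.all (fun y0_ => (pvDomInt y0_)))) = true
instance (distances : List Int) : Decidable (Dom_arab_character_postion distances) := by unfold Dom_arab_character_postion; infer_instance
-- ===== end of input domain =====

-- B removes the sort: one streaming pass keeps the two largest values, then the answer is the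
-- first position whose value reaches the second-largest threshold (objective: alternative — no sort, two linear passes).

-- ===== PORT A =====
-- A's loop: for i in range(len(distances)): return i+1 at the first element equal to max1 or max2
def pvLoopA (m1 m2 : Int) : List Int → Int → Int
  | [], _ => 0
  | x :: xs, i => if x = m1 then i + 1 else if x = m2 then i + 1 else pvLoopA m1 m2 xs (i + 1)

def arab_character_postion (distances : List Int) : Int :=
  let sorted_distances := PySem.List.sorted distances (fun x => x) true
  match PySem.List.pyGet? sorted_distances 0, PySem.List.pyGet? sorted_distances 1 with
  | some max1, some max2 => pvLoopA max1 max2 distances 0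
  | _, _ => 0  -- IndexError (len < 2): excluded by Pre_

-- ===== PORT B =====
-- one step of B's streaming (best, second) update
def pvStep (st : Option Int × Option Int) (v : Int) : Option Int × Option Int :=
  match st with
  | (none, _) => (some v, none)                 -- best is None: best, second = v, best
  | (some b, none) =>                           -- second is None
    if v > b then (some v, some b) else (some b, some v)
  | (some b, some c) =>
    if v > b then (some v, some b)
    else if v > c then (some b, some v)
    else (some b, some c)

-- B's second loop: first index whose value reaches the threshold
def pvLoopB (t : Int) : List Int → Int → Int
  | [], _ => 0                                   -- implicit None: unreachable under Pre_
  | x :: xs, i => if x ≥ t then i + 1 else pvLoopB t xs (i + 1)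

def arab_character_postion_alt (distances : List Int) : Int :=
  match (distances.foldl pvStep (none, none)).2 with
  | none => 0    -- len < 2: Python leaves second = None; excluded by Pre_
  | some t => pvLoopB t distances 0

-- ===== PRECONDITION & SPEC =====
-- A raises IndexError when len(distances) < 2.
def Pre_arab_character_postion (distances : List Int) : Prop := 2 ≤ distances.length
instance (distances : List Int) : Decidable (Pre_arab_character_postion distances) := by unfold Pre_arab_character_postion; infer_instance
def pvWitness_arab_character_postion : List Int := [3, 7, 5]

def Spec_arab_character_postion (distances : List Int) (out : Int) : Prop := out = arab_character_postion_alt distances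
instance (distances : List Int) (out : Int) : Decidable (Spec_arab_character_postion distances out) := by unfold Spec_arab_character_postion; infer_instance

-- ===== CLAIM (what is proved, stated in full; the proofs are below) =====
def Claim_equal_arab_character_postion : Prop := ∀ (distances : List Int), Dom_arab_character_postion distances → Pre_arab_character_postion distances → Spec_arab_character_postion distances (arab_character_postion distances)

-- ===== LEMMAS AND PROOFS =====

-- "c is a second-largest value of p": at most one element exceeds it, at least two reach it.
def pvP2 (p : List Int) (c : Int) : Prop :=
  p.countP (fun x => decide (c < x)) ≤ 1 ∧ 2 ≤ p.countP (fun x => decide (c ≤ x))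

-- pvP2 determines the value uniquely.
theorem pvP2_unique {p : List Int} {x y : Int} (hx : pvP2 p x) (hy : pvP2 p y) : x = y := by
  rcases hx with ⟨hx1, hx2⟩
  rcases hy with ⟨hy1, hy2⟩
  by_contra hne
  rcases lt_or_gt_of_ne hne with h | h
  · have := List.countP_mono_left (l := p)
      (p := fun z => decide (y ≤ z)) (q := fun z => decide (x < z))
      (fun a _ ha => by simp_all; omega)
    omega
  · have := List.countP_mono_left (l := p)
      (p := fun z => decide (x ≤ z)) (q := fun z => decide (y < z))
      (fun a _ ha => by simp_all; omega)
    omega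

-- invariant of B's streaming pass once two elements have been seen
def pvInv (p : List Int) (st : Option Int × Option Int) : Prop :=
  ∃ b c, st = (some b, some c) ∧ b ∈ p ∧ (∀ x ∈ p, x ≤ b) ∧ c ≤ b ∧ pvP2 p c

theorem pvStep_inv {p : List Int} {st : Option Int × Option Int} (h : pvInv p st) (v : Int) :
    pvInv (p ++ [v]) (pvStep st v) := by
  obtain ⟨b, c, hst, hb, hmax, hcb, hgt, hge⟩ := h
  subst hst
  have hbge : 1 ≤ p.countP (fun x => decide (b ≤ x)) :=
    List.countP_pos_iff.mpr ⟨b, hb, by simp⟩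
  by_cases h1 : v > b
  · refine ⟨v, b, by simp [pvStep, h1], by simp, ?_, by omega, ?_, ?_⟩
    · intro x hx; rcases List.mem_append.mp hx with hx | hx
      · exact le_of_lt (lt_of_le_of_lt (hmax x hx) h1)
      · simp at hx; omega
    · have h0 : p.countP (fun x => decide (b < x)) = 0 :=
        List.countP_eq_zero.mpr (fun a ha => by simpa using not_lt.mpr (hmax a ha))
      have h2 : List.countP (fun x => decide (b < x)) [v] = 1 := by simp [h1]
      rw [List.countP_append, h0, h2]
    · have h2 : List.countP (fun x => decide (b ≤ x)) [v] = 1 := by simp; omega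
      rw [List.countP_append, h2]; omega
  · by_cases h2 : v > c
    · refine ⟨b, v, by simp [pvStep, h1, h2], by simp [hb], ?_, by omega, ?_, ?_⟩
      · intro x hx; rcases List.mem_append.mp hx with hx | hx
        · exact hmax x hx
        · simp at hx; omega
      · have hmono : p.countP (fun x => decide (v < x)) ≤ p.countP (fun x => decide (c < x)) :=
          List.countP_mono_left (fun a _ ha => by simp_all; omega)
        have hv0 : List.countP (fun x => decide (v < x)) [v] = 0 := by simp
        rw [List.countP_append, hv0]; omega
      · have hge1 : 1 ≤ p.countP (fun x => decide (v ≤ x)) :=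
          List.countP_pos_iff.mpr ⟨b, hb, by simp; omega⟩
        have hv1 : List.countP (fun x => decide (v ≤ x)) [v] = 1 := by simp
        rw [List.countP_append, hv1]; omega
    · refine ⟨b, c, by simp [pvStep, h1, h2], by simp [hb], ?_, hcb, ?_, ?_⟩
      · intro x hx; rcases List.mem_append.mp hx with hx | hx
        · exact hmax x hx
        · simp at hx; omega
      · have hv0 : List.countP (fun x => decide (c < x)) [v] = 0 := by simp; omega
        rw [List.countP_append, hv0]; omega
      · rw [List.countP_append]; omega

theorem pvFoldl_inv : ∀ (xs p : List Int) (st : Option Int × Option Int),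
    pvInv p st → pvInv (p ++ xs) (xs.foldl pvStep st) := by
  intro xs
  induction xs with
  | nil => intro p st h; simpa using h
  | cons v xs ih =>
    intro p st h
    have := ih (p ++ [v]) (pvStep st v) (pvStep_inv h v)
    simpa using this

-- after the first two elements the invariant holds
theorem pvInv_two (x y : Int) : pvInv [x, y] (pvStep (pvStep (none, none) x) y) := by
  by_cases h : y > x
  · refine ⟨y, x, by simp [pvStep, h], by simp, ?_, by omega, ?_, ?_⟩
    · intro a ha; simp at ha; rcases ha with rfl | rfl <;> omega
    · simp [h]
    · have : x ≤ y := by omega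
      simp [this]
  · refine ⟨x, y, by simp [pvStep, h], by simp, ?_, by omega, ?_, ?_⟩
    · intro a ha; simp at ha; rcases ha with rfl | rfl <;> omega
    · simp [List.countP_cons]
      split_ifs <;> omega
    · have : y ≤ x := by omega
      simp [this]

-- the two scans agree when the predicates agree pointwise on the list
theorem pvLoopA_eq_loopB (m1 m2 : Int) :
    ∀ (xs : List Int) (i : Int), (∀ v ∈ xs, (v = m1 ∨ v = m2) ↔ m2 ≤ v) →
    pvLoopA m1 m2 xs i = pvLoopB m2 xs i := by
  intro xs
  induction xs with
  | nil => intro i _; rfl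
  | cons x xs ih =>
    intro i hpt
    have hx := hpt x (by simp)
    rw [pvLoopA, pvLoopB]
    by_cases h1 : x = m1
    · rw [if_pos h1, if_pos (by exact hx.mp (Or.inl h1))]
    · by_cases h2 : x = m2
      · rw [if_neg h1, if_pos h2, if_pos (by exact hx.mp (Or.inr h2))]
      · rw [if_neg h1, if_neg h2, if_neg (by intro hge; rcases hx.mpr hge with h | h <;> simp_all),
          ih (i + 1) (fun v hv => hpt v (by simp [hv]))]

-- ===== VERDICT (by name: the statement is the Claim_ definition above) =====
theorem arab_character_postion_spec : Claim_equal_arab_character_postion := by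
  intro d _ hpre
  unfold Spec_arab_character_postion arab_character_postion arab_character_postion_alt
  have hpre' : 2 ≤ d.length := hpre
  have hlen : (PySem.List.sorted d (fun x => x) true).length = d.length :=
    PySem.List.length_sorted ..
  obtain ⟨a, b, t, hcons⟩ : ∃ a b t, PySem.List.sorted d (fun x => x) true = a :: b :: t := by
    rcases hh : PySem.List.sorted d (fun x => x) true with _ | ⟨a, _ | ⟨b, t⟩⟩
    · rw [hh] at hlen; simp at hlen; omega
    · rw [hh] at hlen; simp at hlen; omega
    · exact ⟨a, b, t, rfl⟩
  have hpair : (PySem.List.sorted d (fun x => x) true).Pairwise (fun x y => y ≤ x) :=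
    PySem.List.sorted_pairwise_rev ..
  rw [hcons] at hpair
  have hab : b ≤ a := (List.pairwise_cons.mp hpair).1 b (by simp)
  have htle : ∀ x ∈ t, x ≤ b :=
    fun x hx => (List.pairwise_cons.mp (List.pairwise_cons.mp hpair).2).1 x hx
  have hperm : (PySem.List.sorted d (fun x => x) true).Perm d := PySem.List.sorted_perm ..
  rw [hcons] at hperm
  have hget0 : PySem.List.pyGet? (a :: b :: t) 0 = some a := by
    have h := PySem.List.pyGet?_ofNat (a :: b :: t) 0 (by simp)
    rw [show ((0:Nat):Int) = (0:Int) from rfl] at h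
    rw [h]; rfl
  have hget1 : PySem.List.pyGet? (a :: b :: t) 1 = some b := by
    have h := PySem.List.pyGet?_ofNat (a :: b :: t) 1 (by simp)
    rw [show ((1:Nat):Int) = (1:Int) from rfl] at h
    rw [h]; rfl
  simp only [hcons, hget0, hget1]
  -- b satisfies pvP2 d
  have hP2b : pvP2 d b := by
    constructor
    · rw [← hperm.countP_eq]
      have h0 : t.countP (fun x => decide (b < x)) = 0 :=
        List.countP_eq_zero.mpr (fun x hx => by simpa using not_lt.mpr (htle x hx))
      simp [List.countP_cons, h0]
      split_ifs <;> omega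
    · rw [← hperm.countP_eq]
      simp [hab]
  -- B's fold reaches a (some, some) state satisfying the invariant over d
  obtain ⟨x, y, rest, hd⟩ : ∃ x y rest, d = x :: y :: rest := by
    rcases d with _ | ⟨x, _ | ⟨y, rest⟩⟩
    · simp at hpre'
    · simp at hpre'
    · exact ⟨x, y, rest, rfl⟩
  have hinv : pvInv d (d.foldl pvStep (none, none)) := by
    rw [hd]
    have := pvFoldl_inv rest [x, y] _ (pvInv_two x y)
    simpa [List.foldl] using this
  obtain ⟨b', c', hst, _, _, _, hP2c⟩ := hinv
  rw [hst]
  -- the streamed second-largest equals sorted[1]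
  have hcb : c' = b := pvP2_unique hP2c hP2b
  rw [hcb]
  -- pointwise agreement of the two scan predicates on members of d
  apply pvLoopA_eq_loopB
  intro v hv
  constructor
  · rintro (rfl | rfl)
    · exact hab
    · exact le_refl _
  · intro hge
    have hvs : v ∈ a :: b :: t := hperm.mem_iff.mpr hv
    simp at hvs
    rcases hvs with rfl | rfl | hvt
    · exact Or.inl rfl
    · exact Or.inr rfl
    · exact Or.inr (le_antisymm (htle v hvt) hge)
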